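-- pv_equiv track=rewrite | github.com/jhmarryme/Python-in-action | inbox/2024_company_algorithm/A10_通过障碍物/entry.py | cut
-- ===== SOURCE A (Python) =====
-- def cut(a):
--     if len(a) % 5 != 0:
--         return 0
--
--     num_obstacles = len(a) // 5
--     horizontal_costs = []
--     vertical_costs = []
--
--     for i in range(num_obstacles):
--         x1 = a[5 * i]
--         y1 = a[5 * i + 1]
--         x2 = a[5 * i + 2]
--         y2 = a[5 * i + 3]
--         Ci = a[5 * i + 4]
--
--         if y1 == y2:
--             horizontal_costs.append(Ci)
--         elif x1 == x2:
--             vertical_costs.append(Ci)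
--         else:
--             pass
--
--     if len(horizontal_costs) >= 1:
--         min_ci_hi = min(horizontal_costs)
--         sum_c_hi = sum(horizontal_costs)
--         total_cost_hi = sum_c_hi - min_ci_hi
--     else:
--         total_cost_hi = float('inf')
--
--     if len(vertical_costs) >= 1:
--         min_ci_vi = min(vertical_costs)
--         sum_c_vi = sum(vertical_costs)
--         total_cost_vi = sum_c_vi - min_ci_vi
--     else:
--         total_cost_vi = float('inf')
--
--     if horizontal_costs and vertical_costs:
--         min_total_cost = min(total_cost_hi, total_cost_vi)
--     elif horizontal_costs:
--         min_total_cost = total_cost_hi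
--     elif vertical_costs:
--         min_total_cost = total_cost_vi
--     else:
--         min_total_cost = 0
--
--     if min_total_cost == float('inf'):
--         min_total_cost = 0
--
--     return min_total_cost
-- ===== SOURCE B (Python) =====
-- def cut(a):
--     if len(a) % 5:
--         return 0
--     # tag each relevant obstacle (0 = horizontal, 1 = vertical) and sort all tagged
--     # costs once; in the sorted list each category is a contiguous run whose first
--     # element is its minimum cost.
--     tagged = sorted(
--         (0 if a[i + 1] == a[i + 3] else 1, a[i + 4])
--         for i in range(0, len(a), 5)
--         if a[i + 1] == a[i + 3] or a[i] == a[i + 2]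
--     )
--     best = None
--     j = 0
--     while j < len(tagged):
--         k = tagged[j][0]
--         cost = -tagged[j][1]          # subtract the group's minimum up front
--         while j < len(tagged) and tagged[j][0] == k:
--             cost += tagged[j][1]
--             j += 1
--         if best is None or cost < best:
--             best = cost
--     return 0 if best is None else best
-- ===== Notes on version B (the rewrite author's own statement) =====
-- stated objective: alternative
-- what changed: B replaces A's build-two-category-lists-then-aggregate (separate min/sum passes and a float('inf') branch ladder) with tag-and-sort: each relevant obstacle becomes a (category, cost) pair, one lexicographic sort makes each category a contiguous run headed by its minimum, and a single grouped scan takes the best (sum minus first element) over runs.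
import Mathlib
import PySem

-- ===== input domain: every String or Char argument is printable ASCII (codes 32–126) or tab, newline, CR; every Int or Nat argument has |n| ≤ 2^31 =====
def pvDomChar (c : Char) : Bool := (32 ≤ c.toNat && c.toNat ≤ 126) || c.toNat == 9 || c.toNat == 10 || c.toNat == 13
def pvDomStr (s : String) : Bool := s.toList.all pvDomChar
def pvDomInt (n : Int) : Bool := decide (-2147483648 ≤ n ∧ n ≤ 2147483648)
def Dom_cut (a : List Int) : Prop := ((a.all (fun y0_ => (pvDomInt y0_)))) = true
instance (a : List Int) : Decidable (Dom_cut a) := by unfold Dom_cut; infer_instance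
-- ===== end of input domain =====

-- B tags each relevant obstacle (0 = horizontal, 1 = vertical), sorts all tagged costs
-- once, and scans the sorted list group by group (group cost = sum minus its first,
-- i.e. minimal, element) instead of A's per-category lists with separate min/sum passes
-- and the float('inf') branch ladder; objective: alternative (sort-then-scan).

-- ===== PORT A =====
-- A's float('inf') only ever mixes with ints here, so the value int-or-inf is ported
-- exactly as Option Int (none = inf); pyGetD's default is never used (indices are in range).
def cut (a : List Int) : Int :=
  if PySem.Int.mod (a.length : Int) 5 ≠ 0 then 0
  else
    let num := PySem.Int.floordiv (a.length : Int) 5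
    let st := (PySem.List.pyRange 0 num 1).foldl (fun (st : List Int × List Int) i =>
      let x1 := PySem.List.pyGetD a (5 * i) 0
      let y1 := PySem.List.pyGetD a (5 * i + 1) 0
      let x2 := PySem.List.pyGetD a (5 * i + 2) 0
      let y2 := PySem.List.pyGetD a (5 * i + 3) 0
      let c  := PySem.List.pyGetD a (5 * i + 4) 0
      if y1 == y2 then (st.1 ++ [c], st.2)
      else if x1 == x2 then (st.1, st.2 ++ [c])
      else st) ([], [])
    let hs := st.1
    let vs := st.2
    let tHi : Option Int :=
      if 1 ≤ hs.length then some (hs.sum - (PySem.List.min? hs (fun x => x)).getD 0) else none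
    let tVi : Option Int :=
      if 1 ≤ vs.length then some (vs.sum - (PySem.List.min? vs (fun x => x)).getD 0) else none
    let mt : Option Int :=
      if !hs.isEmpty && !vs.isEmpty then
        match tHi, tVi with
        | some u, some w => some (min u w)
        | some u, none => some u
        | none, some w => some w
        | none, none => none
      else if !hs.isEmpty then tHi
      else if !vs.isEmpty then tVi
      else some 0
    match mt with
    | none => 0        -- min_total_cost == float('inf')
    | some r => r

-- ===== PORT B =====
-- the inner while loop: consume the leading run with tag k, accumulating its costs
def takeGroupB (k : Int) : List (Int × Int) → Int × List (Int × Int)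
  | [] => (0, [])
  | (k', c) :: t =>
      if k' == k then ((takeGroupB k t).1 + c, (takeGroupB k t).2)
      else (0, (k', c) :: t)

-- termination measure for scanB (the inner while never re-adds elements)
theorem takeGroupB_len (k : Int) : ∀ (l : List (Int × Int)), (takeGroupB k l).2.length ≤ l.length := by
  intro l
  induction l with
  | nil => simp [takeGroupB]
  | cons p t ih =>
    rcases p with ⟨k', c⟩
    by_cases h : k' == k <;> simp [takeGroupB, h]
    omega

-- the outer while loop: best over the groups (None = no group seen yet)
def scanB : List (Int × Int) → Option Int → Option Int
  | [], best => best
  | (k, c) :: t, best =>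
      let g := takeGroupB k ((k, c) :: t)
      let cost := -c + g.1          -- cost starts at -tagged[j][1], then the run is added
      scanB g.2 (match best with
        | none => some cost
        | some b => if cost < b then some cost else some b)
termination_by l _ => l.length
decreasing_by
  simp only [takeGroupB, BEq.rfl, if_pos]
  exact Nat.lt_succ_of_le (takeGroupB_len k t)

def cut_alt (a : List Int) : Int :=
  if PySem.Int.mod (a.length : Int) 5 ≠ 0 then 0
  else
    let tagged := PySem.List.sorted2
      (((PySem.List.pyRange 0 (a.length : Int) 5).filter (fun i =>
          PySem.List.pyGetD a (i + 1) 0 == PySem.List.pyGetD a (i + 3) 0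
            || PySem.List.pyGetD a i 0 == PySem.List.pyGetD a (i + 2) 0)).map (fun i =>
          ((if PySem.List.pyGetD a (i + 1) 0 == PySem.List.pyGetD a (i + 3) 0 then (0 : Int) else 1),
           PySem.List.pyGetD a (i + 4) 0)))
      Prod.fst Prod.snd
    match scanB tagged none with
    | none => 0
    | some b => b

-- ===== PRECONDITION & SPEC =====
def Spec_cut (a : List Int) (out : Int) : Prop := out = cut_alt a
instance (a : List Int) (out : Int) : Decidable (Spec_cut a out) := by unfold Spec_cut; infer_instance

-- ===== CLAIM (what is proved, stated in full; the proofs are below) =====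
def Claim_equal_cut : Prop := ∀ (a : List Int), Dom_cut a → Spec_cut a (cut a)

-- ===== LEMMAS AND PROOFS =====

-- classification of the input into (horizontal costs, vertical costs), 5 values per obstacle
def cls : List Int → List Int × List Int
  | x1 :: y1 :: x2 :: y2 :: c :: rest =>
      let p := cls rest
      if y1 == y2 then (c :: p.1, p.2)
      else if x1 == x2 then (p.1, c :: p.2)
      else p
  | _ => ([], [])

-- A's loop in chunked form
def chunkA : List Int → List Int × List Int → List Int × List Int
  | x1 :: y1 :: x2 :: y2 :: c :: rest, st =>
      chunkA rest (if y1 == y2 then (st.1 ++ [c], st.2)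
        else if x1 == x2 then (st.1, st.2 ++ [c]) else st)
  | _, st => st

theorem getD_cons5 (x1 y1 x2 y2 c d : Int) (rest : List Int) (m : Nat) :
    (x1 :: y1 :: x2 :: y2 :: c :: rest).getD (m + 5) d = rest.getD m d := by
  simp [show m + 5 = m + 4 + 1 from rfl, show m + 4 = m + 3 + 1 from rfl,
    show m + 3 = m + 2 + 1 from rfl, show m + 2 = m + 1 + 1 from rfl]

theorem A_loop : ∀ (n : Nat) (a : List Int), a.length = 5 * n → ∀ (st : List Int × List Int),
    (PySem.List.pyRange 0 (n : Int) 1).foldl (fun (st : List Int × List Int) i =>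
      let x1 := PySem.List.pyGetD a (5 * i) 0
      let y1 := PySem.List.pyGetD a (5 * i + 1) 0
      let x2 := PySem.List.pyGetD a (5 * i + 2) 0
      let y2 := PySem.List.pyGetD a (5 * i + 3) 0
      let c  := PySem.List.pyGetD a (5 * i + 4) 0
      if y1 == y2 then (st.1 ++ [c], st.2)
      else if x1 == x2 then (st.1, st.2 ++ [c])
      else st) st = chunkA a st := by
  intro n
  induction n with
  | zero =>
    intro a h st
    have ha : a = [] := List.eq_nil_of_length_eq_zero (by omega)
    subst ha
    simp [chunkA]
  | succ n ih =>
    intro a h st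
    rcases a with _ | ⟨x1, _ | ⟨y1, _ | ⟨x2, _ | ⟨y2, _ | ⟨c, rest⟩⟩⟩⟩⟩ <;>
      simp only [List.length] at h <;> try omega
    have hrest : rest.length = 5 * n := by omega
    set f : (List Int × List Int) → Int → (List Int × List Int) := fun st i =>
      let x1' := PySem.List.pyGetD (x1 :: y1 :: x2 :: y2 :: c :: rest) (5 * i) 0
      let y1' := PySem.List.pyGetD (x1 :: y1 :: x2 :: y2 :: c :: rest) (5 * i + 1) 0
      let x2' := PySem.List.pyGetD (x1 :: y1 :: x2 :: y2 :: c :: rest) (5 * i + 2) 0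
      let y2' := PySem.List.pyGetD (x1 :: y1 :: x2 :: y2 :: c :: rest) (5 * i + 3) 0
      let c'  := PySem.List.pyGetD (x1 :: y1 :: x2 :: y2 :: c :: rest) (5 * i + 4) 0
      if y1' == y2' then (st.1 ++ [c'], st.2)
      else if x1' == x2' then (st.1, st.2 ++ [c'])
      else st with hf
    rw [show ((n + 1 : Nat) : Int) = (n : Int) + 1 from by push_cast; ring]
    rw [PySem.List.pyRange_one_cons (by positivity), List.foldl_cons]
    have h0 : f st 0 = (if y1 == y2 then (st.1 ++ [c], st.2)
        else if x1 == x2 then (st.1, st.2 ++ [c]) else st) := by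
      simp only [hf]
      norm_num [PySem.List.pyGetD_of_nonneg, List.getD, show Int.toNat 2 = 2 from rfl,
        show Int.toNat 3 = 3 from rfl, show Int.toNat 4 = 4 from rfl]
    rw [h0]
    rw [show chunkA (x1 :: y1 :: x2 :: y2 :: c :: rest) st
        = chunkA rest (if y1 == y2 then (st.1 ++ [c], st.2)
            else if x1 == x2 then (st.1, st.2 ++ [c]) else st) from rfl]
    rw [← ih rest hrest _]
    rw [show (0 : Int) + 1 = 1 from by norm_num]
    rw [PySem.List.pyRange_one 1 ((n : Int) + 1), PySem.List.pyRange_one 0 (n : Int)]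
    rw [show ((n : Int) + 1 - 1).toNat = n from by omega, show ((n : Int) - 0).toNat = n from by omega]
    rw [List.foldl_map, List.foldl_map]
    apply List.foldl_ext
    intro st'' k hkmem
    have e : ∀ (jj : Int) (jn : Nat), jj = (jn : Int) →
        PySem.List.pyGetD (x1 :: y1 :: x2 :: y2 :: c :: rest) (5 * (1 + (k : Int)) + jj) 0
          = PySem.List.pyGetD rest (5 * (0 + (k : Int)) + jj) 0 := by
      rintro jj jn rfl
      rw [show (5 * (1 + (k : Int)) + (jn : Int)) = ((5 * k + jn + 5 : Nat) : Int) from by push_cast; ring,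
          show (5 * (0 + (k : Int)) + (jn : Int)) = ((5 * k + jn : Nat) : Int) from by push_cast; ring]
      rw [PySem.List.pyGetD_natCast, PySem.List.pyGetD_natCast, getD_cons5]
    have e0 : PySem.List.pyGetD (x1 :: y1 :: x2 :: y2 :: c :: rest) (5 * (1 + (k : Int))) 0
        = PySem.List.pyGetD rest (5 * (0 + (k : Int))) 0 := by
      have := e 0 0 rfl; simpa using this
    simp only [hf]
    rw [e0, e 1 1 rfl, e 2 2 rfl, e 3 3 rfl, e 4 4 rfl]

theorem chunkA_eq : ∀ (a : List Int) (p q : List Int),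
    chunkA a (p, q) = (p ++ (cls a).1, q ++ (cls a).2) := by
  intro a
  induction a using cls.induct with
  | case1 x1 y1 x2 y2 c rest h1 ih => intro p q; simp [chunkA, cls, h1, ih]
  | case2 x1 y1 x2 y2 c rest h1 h2 ih => intro p q; simp [chunkA, cls, h1, h2, ih]
  | case3 x1 y1 x2 y2 c rest h1 h2 ih => intro p q; simp [chunkA, cls, h1, h2, ih]
  | case4 a h =>
    intro p q
    rcases a with _ | ⟨x1, _ | ⟨y1, _ | ⟨x2, _ | ⟨y2, _ | ⟨c, rest⟩⟩⟩⟩⟩ <;>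
      first
      | (exact absurd rfl (h _ _ _ _ _ _))
      | simp [chunkA, cls]

-- B's generator expression in chunked form: the tagged (category, cost) list in input order
def tagList : List Int → List (Int × Int)
  | x1 :: y1 :: x2 :: y2 :: c :: rest =>
      if y1 == y2 then (0, c) :: tagList rest
      else if x1 == x2 then (1, c) :: tagList rest
      else tagList rest
  | _ => []

theorem shift5 (x1 y1 x2 y2 c : Int) (rest : List Int) (m : Nat) (jj : Int) (jn : Nat)
    (h : jj = (jn : Int)) :
    PySem.List.pyGetD (x1 :: y1 :: x2 :: y2 :: c :: rest) (((m : Nat) : Int) + 5 + jj) 0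
      = PySem.List.pyGetD rest ((m : Int) + jj) 0 := by
  subst h
  rw [show ((m : Int) + 5 + (jn : Int)) = ((m + jn + 5 : Nat) : Int) from by push_cast; ring,
      show ((m : Int) + (jn : Int)) = ((m + jn : Nat) : Int) from by push_cast; ring,
      PySem.List.pyGetD_natCast, PySem.List.pyGetD_natCast, getD_cons5]

theorem shift5' (x1 y1 x2 y2 c : Int) (rest : List Int) (m : Nat) :
    PySem.List.pyGetD (x1 :: y1 :: x2 :: y2 :: c :: rest) (((m : Nat) : Int) + 5) 0
      = PySem.List.pyGetD rest ((m : Int)) 0 := by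
  have := shift5 x1 y1 x2 y2 c rest m 0 0 rfl
  simpa using this

theorem tag_build : ∀ (n : Nat) (a : List Int), a.length = 5 * n →
    (((List.range n).map (fun k => ((5 * k : Nat) : Int))).filter (fun i =>
        PySem.List.pyGetD a (i + 1) 0 == PySem.List.pyGetD a (i + 3) 0
          || PySem.List.pyGetD a i 0 == PySem.List.pyGetD a (i + 2) 0)).map (fun i =>
        ((if PySem.List.pyGetD a (i + 1) 0 == PySem.List.pyGetD a (i + 3) 0 then (0 : Int) else 1),
         PySem.List.pyGetD a (i + 4) 0)) = tagList a := by
  intro n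
  induction n with
  | zero =>
    intro a h
    have ha : a = [] := List.eq_nil_of_length_eq_zero (by omega)
    subst ha
    simp [tagList]
  | succ n ih =>
    intro a h
    rcases a with _ | ⟨x1, _ | ⟨y1, _ | ⟨x2, _ | ⟨y2, _ | ⟨c, rest⟩⟩⟩⟩⟩ <;>
      simp only [List.length] at h <;> try omega
    have hrest : rest.length = 5 * n := by omega
    set A5 := x1 :: y1 :: x2 :: y2 :: c :: rest with hA5
    set pB : List Int → Int → Bool := fun a i =>
      (PySem.List.pyGetD a (i + 1) 0 == PySem.List.pyGetD a (i + 3) 0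
        || PySem.List.pyGetD a i 0 == PySem.List.pyGetD a (i + 2) 0) with hpB
    set fB : List Int → Int → Int × Int := fun a i =>
      ((if PySem.List.pyGetD a (i + 1) 0 == PySem.List.pyGetD a (i + 3) 0 then (0 : Int) else 1),
       PySem.List.pyGetD a (i + 4) 0) with hfB
    -- split off index 0 and shift the rest
    rw [List.range_succ_eq_map, List.map_cons, List.filter_cons]
    have hmap : (List.range n).map ((fun k => ((5 * k : Nat) : Int)) ∘ (· + 1))
        = ((List.range n).map (fun k => ((5 * k : Nat) : Int))).map (fun i => i + 5) := by
      rw [List.map_map]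
      apply List.map_congr_left
      intro k _
      simp only [Function.comp_apply]
      push_cast
      ring
    rw [List.map_map, hmap]
    -- evaluate the head (index 0)
    have hh1 : PySem.List.pyGetD A5 ((5 * 0 : Nat) : Int) 0 = x1 := by norm_num [hA5, PySem.List.pyGetD_of_nonneg, List.getD]
    have hh : ∀ (jn : Nat) (v : Int), A5.getD jn 0 = v → PySem.List.pyGetD A5 (((5 * 0 : Nat) : Int) + (jn : Int)) 0 = v := by
      intro jn v hv
      rw [show (((5 * 0 : Nat) : Int) + (jn : Int)) = ((jn : Nat) : Int) from by push_cast; ring,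
          PySem.List.pyGetD_natCast, hv]
    -- shifted predicate/function agree with rest
    have hpshift : ∀ i ∈ (List.range n).map (fun k => ((5 * k : Nat) : Int)),
        pB A5 (i + 5) = pB rest i := by
      intro i hi
      obtain ⟨k, -, rfl⟩ := List.mem_map.mp hi
      simp only [hpB, hA5]
      rw [show ((5 * k : Nat) : Int) + 5 + 1 = ((5 * k : Nat) : Int) + 5 + (1 : Int) from rfl]
      rw [shift5 x1 y1 x2 y2 c rest (5 * k) 1 1 rfl, shift5 x1 y1 x2 y2 c rest (5 * k) 3 3 rfl,
          shift5' x1 y1 x2 y2 c rest (5 * k), shift5 x1 y1 x2 y2 c rest (5 * k) 2 2 rfl]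
    have hfshift : ∀ i ∈ (List.range n).map (fun k => ((5 * k : Nat) : Int)),
        fB A5 (i + 5) = fB rest i := by
      intro i hi
      obtain ⟨k, -, rfl⟩ := List.mem_map.mp hi
      simp only [hfB, hA5]
      rw [shift5 x1 y1 x2 y2 c rest (5 * k) 1 1 rfl, shift5 x1 y1 x2 y2 c rest (5 * k) 3 3 rfl,
          shift5 x1 y1 x2 y2 c rest (5 * k) 4 4 rfl]
    -- tail = tagList rest
    have htail : ((((List.range n).map (fun k => ((5 * k : Nat) : Int))).map (fun i => i + 5)).filter
          (pB A5)).map (fB A5) = tagList rest := by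
      rw [List.filter_map, List.map_map]
      have h1 : ((List.range n).map (fun k => ((5 * k : Nat) : Int))).filter ((pB A5) ∘ (fun i => i + 5))
          = ((List.range n).map (fun k => ((5 * k : Nat) : Int))).filter (pB rest) := by
        apply List.filter_congr
        intro i hi
        simpa using hpshift i hi
      rw [h1]
      have h2 : (((List.range n).map (fun k => ((5 * k : Nat) : Int))).filter (pB rest)).map
            ((fB A5) ∘ (fun i => i + 5))
          = (((List.range n).map (fun k => ((5 * k : Nat) : Int))).filter (pB rest)).map (fB rest) := by
        apply List.map_congr_left
        intro i hi
        have hi' := List.mem_of_mem_filter hi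
        simpa using hfshift i hi'
      rw [h2]
      exact ih rest hrest
    -- now case on the head classification
    have hy1 : PySem.List.pyGetD A5 (((5 * 0 : Nat) : Int) + 1) 0 = y1 := hh 1 y1 rfl
    have hy2 : PySem.List.pyGetD A5 (((5 * 0 : Nat) : Int) + 3) 0 = y2 := hh 3 y2 rfl
    have hx2 : PySem.List.pyGetD A5 (((5 * 0 : Nat) : Int) + 2) 0 = x2 := hh 2 x2 rfl
    have hc : PySem.List.pyGetD A5 (((5 * 0 : Nat) : Int) + 4) 0 = c := hh 4 c rfl
    by_cases hY : y1 == y2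
    · have hp : pB A5 ((5 * 0 : Nat) : Int) = true := by
        simp only [hpB, hy1, hy2]
        simp [hY]
      rw [if_pos hp, List.map_cons, htail]
      simp only [hy1, hy2, hc]
      rw [hA5]
      simp [tagList, hY]
    · by_cases hX : x1 == x2
      · have hp : pB A5 ((5 * 0 : Nat) : Int) = true := by
          simp only [hpB, hy1, hy2, hh1, hx2]
          simp [hX]
        rw [if_pos hp, List.map_cons, htail]
        simp only [hy1, hy2, hc]
        rw [hA5]
        simp [tagList, hY, hX]
      · have hp : pB A5 ((5 * 0 : Nat) : Int) = false := by
          simp only [hpB, hy1, hy2, hh1, hx2]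
          simp [hY, hX]
        rw [if_neg (by simp only [hy1, hy2, hh1, hx2]; simp [hY, hX]), htail]
        rw [hA5]
        simp [tagList, hY, hX]

theorem tag_perm : ∀ (a : List Int),
    (tagList a).Perm ((cls a).1.map (fun c => ((0 : Int), c)) ++ (cls a).2.map (fun c => ((1 : Int), c))) := by
  intro a
  induction a using cls.induct with
  | case1 x1 y1 x2 y2 c rest h1 ih =>
    simp only [tagList, cls, h1, if_pos]
    exact ih.cons _
  | case2 x1 y1 x2 y2 c rest h1 h2 ih =>
    simp only [tagList, cls, h1, h2, if_pos, Bool.false_eq_true, if_false, List.map_cons]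
    exact (ih.cons _).trans List.perm_middle.symm
  | case3 x1 y1 x2 y2 c rest h1 h2 ih =>
    simpa only [tagList, cls, h1, h2, Bool.false_eq_true, if_false] using ih
  | case4 a h =>
    rcases a with _ | ⟨x1, _ | ⟨y1, _ | ⟨x2, _ | ⟨y2, _ | ⟨c, rest⟩⟩⟩⟩⟩ <;>
      first
      | (exact absurd rfl (h _ _ _ _ _ _))
      | simp [tagList, cls]

theorem sorted2_eq_sorted_toLex (xs : List (Int × Int)) :
    PySem.List.sorted2 xs Prod.fst Prod.snd false
      = PySem.List.sorted xs (fun p => (toLex p : Int ×ₗ Int)) false := by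
  have hb : (fun a b : Int × Int =>
        (decide (a.1 < b.1) || (!decide (b.1 < a.1) && decide (a.2 < b.2))))
      = (fun a b : Int × Int => decide ((toLex a : Int ×ₗ Int) < toLex b)) := by
    funext a b
    by_cases h1 : a.1 < b.1 <;> by_cases h2 : b.1 < a.1 <;> by_cases h3 : a.2 < b.2 <;>
      simp [Prod.Lex.lt_iff, h1, h2, h3] <;> omega
  simp only [PySem.List.sorted2, PySem.List.sorted, hb]
  simp

-- the single sort groups the categories: sorted tagged list = sorted h-run ++ sorted v-run
theorem sorted_tag (a : List Int) :
    PySem.List.sorted2 (tagList a) Prod.fst Prod.snd false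
      = (PySem.List.sorted (cls a).1 (fun x => x) false).map (fun c => ((0 : Int), c))
        ++ (PySem.List.sorted (cls a).2 (fun x => x) false).map (fun c => ((1 : Int), c)) := by
  rw [sorted2_eq_sorted_toLex]
  apply PySem.List.eq_of_perm_of_pairwise_le_of_injective (fun p : Int × Int => (toLex p : Int ×ₗ Int))
  · intro a b h; exact h
  · refine (PySem.List.sorted_perm _ _ _).trans ((tag_perm a).trans ?_)
    exact (((PySem.List.sorted_perm (cls a).1 (fun x => x) false).map _).symm.append
      ((PySem.List.sorted_perm (cls a).2 (fun x => x) false).map _).symm)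
  · exact PySem.List.sorted_pairwise _ _
  · rw [List.pairwise_append]
    refine ⟨?_, ?_, ?_⟩
    · rw [List.pairwise_map]
      exact (PySem.List.sorted_pairwise (cls a).1 (fun x => x)).imp (fun h => by
        simp [Prod.Lex.le_iff]; omega)
    · rw [List.pairwise_map]
      exact (PySem.List.sorted_pairwise (cls a).2 (fun x => x)).imp (fun h => by
        simp [Prod.Lex.le_iff]; omega)
    · intro x hx y hy
      simp only [List.mem_map] at hx hy
      obtain ⟨c, -, rfl⟩ := hx
      obtain ⟨d, -, rfl⟩ := hy
      simp [Prod.Lex.le_iff]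

theorem takeGroup_run (k : Int) : ∀ (l : List Int) (r : List (Int × Int)),
    (∀ p ∈ r, p.1 ≠ k) →
    takeGroupB k (l.map (fun c => (k, c)) ++ r) = (l.sum, r) := by
  intro l
  induction l with
  | nil =>
    intro r hr
    rcases r with _ | ⟨⟨k', c⟩, t⟩
    · simp [takeGroupB]
    · have : ¬ (k' == k) := by simpa using hr (k', c) (by simp)
      simp [takeGroupB, this]
  | cons c l ih =>
    intro r hr
    simp only [List.map_cons, List.cons_append, takeGroupB, BEq.rfl, if_pos, ih r hr]
    simp [add_comm]

theorem sorted_head (l : List Int) (h0 : Int) (t : List Int)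
    (h : PySem.List.sorted l (fun x => x) false = h0 :: t) :
    (PySem.List.min? l (fun x => x)).getD 0 = h0 ∧ (h0 :: t).sum = l.sum := by
  have hperm : (h0 :: t).Perm l := h ▸ PySem.List.sorted_perm l _ false
  constructor
  · have h0mem : h0 ∈ l := hperm.mem_iff.mp (by simp)
    obtain ⟨m, hm⟩ : ∃ m, PySem.List.min? l (fun x => x) = some m := by
      cases hmin : PySem.List.min? l (fun x => x) with
      | none =>
        exfalso
        have hl : l = [] := (PySem.List.min?_eq_none_iff _ _).mp hmin
        subst hl
        simp [PySem.List.sorted] at h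
      | some m => exact ⟨m, rfl⟩
    have hmem : m ∈ l := PySem.List.min?_mem hm
    have hle1 : m ≤ h0 := PySem.List.min?_isMin hm h0 h0mem
    have hle2 : h0 ≤ m := PySem.List.key_head_sorted_le l (fun x => x) h m hmem
    rw [hm]
    simp
    omega
  · exact hperm.sum_eq

theorem scanB_cons (k c : Int) (t : List Int) (r : List (Int × Int)) (best : Option Int)
    (hr : ∀ p ∈ r, p.1 ≠ k) :
    scanB ((c :: t).map (fun c => (k, c)) ++ r) best
      = scanB r (match best with
          | none => some (-c + (c :: t).sum)
          | some b => if -c + (c :: t).sum < b then some (-c + (c :: t).sum) else some b) := by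
  simp only [List.map_cons, List.cons_append]
  rw [scanB.eq_def]
  have hg : takeGroupB k ((k, c) :: (t.map (fun c => (k, c)) ++ r)) = ((c :: t).sum, r) := by
    have := takeGroup_run k (c :: t) r hr
    simpa using this
  simp only [hg]

-- ===== VERDICT (by name: the statement is the Claim_ definition above) =====
theorem cut_spec : Claim_equal_cut := by
  intro a _
  unfold Spec_cut
  by_cases hm : PySem.Int.mod (a.length : Int) 5 = 0
  · have hm5 : PySem.Int.mod (a.length : Int) 5 = ((a.length % 5 : Nat) : Int) := by
      rw [show (5 : Int) = ((5 : Nat) : Int) from rfl, PySem.Int.mod_natCast]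
    have hdvd : a.length % 5 = 0 := by omega
    obtain ⟨n, hn⟩ : ∃ n : Nat, a.length = 5 * n := ⟨a.length / 5, by omega⟩
    have hfd : PySem.Int.floordiv (a.length : Int) 5 = (n : Int) := by
      rw [PySem.Int.floordiv_eq_ediv_of_pos (by norm_num)]
      omega
    have hR : PySem.List.pyRange 0 (a.length : Int) 5
        = (List.range n).map (fun k => ((5 * k : Nat) : Int)) := by
      rw [PySem.List.pyRange_of_pos _ _ (by norm_num : (0 : Int) < 5)]
      have hcount : (if (0 : Int) < (a.length : Int)
          then (((a.length : Int) - 0 + 5 - 1) / 5).toNat else 0) = n := by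
        rw [hn]
        push_cast
        split_ifs with h <;> omega
      rw [hcount]
      apply List.map_congr_left
      intro k _
      push_cast
      ring
    unfold cut cut_alt
    rw [if_neg (by simpa using hm), if_neg (by simpa using hm)]
    simp only [hfd]
    rw [A_loop n a hn,
        show chunkA a ([], []) = ([] ++ (cls a).1, [] ++ (cls a).2) from chunkA_eq a [] [],
        List.nil_append, List.nil_append, hR, tag_build n a hn, sorted_tag]
    rcases h1 : (cls a).1 with _ | ⟨ch, lh⟩ <;> rcases h2 : (cls a).2 with _ | ⟨cv, lv⟩
    · simp [PySem.List.sorted, scanB]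
    · rcases hS2 : PySem.List.sorted (cv :: lv) (fun x => x) false with _ | ⟨v0, vt⟩
      · exact absurd ((PySem.List.sorted_eq_nil_iff _ _ _).mp hS2) (by simp)
      obtain ⟨hmin2, hsum2⟩ := sorted_head _ _ _ hS2
      have hscan := scanB_cons 1 v0 vt [] none (by simp)
      simp only [List.map_cons, List.append_nil] at hscan
      rw [show (PySem.List.sorted ([] : List Int) (fun x => x) false) = [] from rfl]
      simp only [List.map_nil, List.nil_append, List.map_cons]
      rw [hscan, show scanB [] (some (-v0 + (v0 :: vt).sum)) = some (-v0 + (v0 :: vt).sum)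
            from by rw [scanB]]
      simp only [List.sum_cons] at hsum2 ⊢
      simp [hmin2]
      omega
    · rcases hS1 : PySem.List.sorted (ch :: lh) (fun x => x) false with _ | ⟨h0, ht⟩
      · exact absurd ((PySem.List.sorted_eq_nil_iff _ _ _).mp hS1) (by simp)
      obtain ⟨hmin1, hsum1⟩ := sorted_head _ _ _ hS1
      have hscan := scanB_cons 0 h0 ht [] none (by simp)
      simp only [List.map_cons, List.append_nil] at hscan
      rw [show (PySem.List.sorted ([] : List Int) (fun x => x) false) = [] from rfl]
      simp only [List.map_nil, List.append_nil, List.map_cons]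
      rw [hscan, show scanB [] (some (-h0 + (h0 :: ht).sum)) = some (-h0 + (h0 :: ht).sum)
            from by rw [scanB]]
      simp only [List.sum_cons] at hsum1 ⊢
      simp [hmin1]
      omega
    · rcases hS1 : PySem.List.sorted (ch :: lh) (fun x => x) false with _ | ⟨h0, ht⟩
      · exact absurd ((PySem.List.sorted_eq_nil_iff _ _ _).mp hS1) (by simp)
      rcases hS2 : PySem.List.sorted (cv :: lv) (fun x => x) false with _ | ⟨v0, vt⟩
      · exact absurd ((PySem.List.sorted_eq_nil_iff _ _ _).mp hS2) (by simp)
      obtain ⟨hmin1, hsum1⟩ := sorted_head _ _ _ hS1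
      obtain ⟨hmin2, hsum2⟩ := sorted_head _ _ _ hS2
      have hscan1 := scanB_cons 0 h0 ht ((v0 :: vt).map (fun c => ((1 : Int), c))) none
        (by simp)
      have hscan2 := scanB_cons 1 v0 vt [] (some (-h0 + (h0 :: ht).sum)) (by simp)
      simp only [List.map_cons, List.cons_append, List.append_nil] at hscan1 hscan2
      simp only [List.map_cons, List.cons_append]
      rw [hscan1, hscan2,
          show ∀ x : Option Int, scanB [] x = x from fun x => by rw [scanB]]
      simp only [List.sum_cons] at hsum1 hsum2 ⊢
      simp [hmin1, hmin2, min_def]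
      split_ifs <;> simp <;> omega
  · unfold cut cut_alt
    rw [if_pos (by simpa using hm), if_pos (by simpa using hm)]
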